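-- pv_equiv track=rewrite | github.com/Fortunnaaa/Lab3 | task3.py | find_duplicate_words
-- ===== SOURCE A (Python) =====
-- def find_duplicate_words(sentence):
--     words = sentence.split()
--     word_count = {}
--
--     # Ітеруємося по словах у реченні і підраховуємо їх кількість
--     for word in words:
--         if word in word_count:
--             word_count[word] += 1
--         else:
--             word_count[word] = 1
--
--     # Шукаємо перше слово, яке зустрічається двічі
--     for word, count in word_count.items():
--         if count == 2:
--             return word
--
--     return None
-- ===== SOURCE B (Python) =====
-- def find_duplicate_words(sentence):
--     words = sentence.split()
--     for word in words:
--         if words.count(word) == 2: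
--             return word
--     return None
-- ===== Notes on version B (the rewrite author's own statement) =====
-- stated objective: simpler
-- what changed: Replaced the two-pass dict-counting algorithm (build a count table, then scan its items) with a single direct loop over the words that returns the first word whose total count in the list is exactly 2, using repeated list scans instead of a table.
import Mathlib
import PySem

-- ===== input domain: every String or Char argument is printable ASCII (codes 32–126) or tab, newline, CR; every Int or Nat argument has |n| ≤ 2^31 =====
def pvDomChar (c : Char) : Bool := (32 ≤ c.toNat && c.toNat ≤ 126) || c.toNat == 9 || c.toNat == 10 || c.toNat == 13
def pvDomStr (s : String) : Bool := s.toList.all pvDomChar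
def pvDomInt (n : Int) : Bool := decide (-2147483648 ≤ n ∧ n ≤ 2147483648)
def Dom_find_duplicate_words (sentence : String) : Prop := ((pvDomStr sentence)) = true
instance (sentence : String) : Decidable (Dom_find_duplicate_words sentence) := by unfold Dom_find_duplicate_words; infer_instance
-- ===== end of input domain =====

-- B replaces A's dict-counting pass + items scan with a single direct loop over the
-- words returning the first word whose total count is exactly 2 (simpler, not faster).


-- ===== PORT A =====
-- words = sentence.split(); count each word into a dict; return first item with count 2
def find_duplicate_words (sentence : String) : Option String :=
  let words := PySem.Str.split₀ sentence
  let word_count := words.foldl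
    (fun d w => if d.contains w then d.insert w (d.getD w 0 + 1) else d.insert w 1)
    (PySem.Dict.empty : PySem.Dict String Int)
  ((word_count.items.find? (fun p => p.2 == 2)).map (fun p => p.1))

-- ===== PORT B =====
-- single loop: first word of the list whose count in the list is exactly 2
def find_duplicate_words_alt (sentence : String) : Option String :=
  let words := PySem.Str.split₀ sentence
  words.find? (fun w => words.count w == 2)

-- ===== PRECONDITION & SPEC =====
def Spec_find_duplicate_words (sentence : String) (out : Option String) : Prop := out = find_duplicate_words_alt sentence
instance (sentence : String) (out : Option String) : Decidable (Spec_find_duplicate_words sentence out) := by unfold Spec_find_duplicate_words; infer_instance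

-- ===== CLAIM (what is proved, stated in full; the proofs are below) =====
def Claim_equal_find_duplicate_words : Prop := ∀ (sentence : String), Dom_find_duplicate_words sentence → Spec_find_duplicate_words sentence (find_duplicate_words sentence)

-- ===== LEMMAS AND PROOFS =====

-- A's counting loop builds exactly Counter(words)
theorem fold_eq_counter (ws : List String) :
    ws.foldl (fun d w => if d.contains w then d.insert w (d.getD w 0 + 1) else d.insert w 1)
      (PySem.Dict.empty : PySem.Dict String Int) = PySem.Dict.counter ws := by
  have hstep : (fun (d : PySem.Dict String Int) w =>
      if d.contains w then d.insert w (d.getD w 0 + 1) else d.insert w 1)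
      = fun d w => d.insert w (d.getD w 0 + 1) := by
    funext d w
    by_cases h : d.contains w = true
    · simp [h]
    · have h' : d.contains w = false := by simpa using h
      rw [if_neg (by simp [h']), PySem.Dict.getD_of_not_contains d 0 h']
      norm_num
  rw [hstep, PySem.Dict.foldl_insert_getD_add_one_eq_counter]

-- filtering out an element that fails the predicate does not change find?
theorem find?_discard (p : String → Bool) (s : List String) (x : String) (hx : p x = false) :
    (PySem.Set.discard s x).find? p = s.find? p := by
  induction s with
  | nil => rfl
  | cons y t ih =>
    by_cases hyx : y = x
    · subst hyx
      simp [PySem.Set.discard, List.find?, hx] at *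
      simpa [PySem.Set.discard] using ih
    · by_cases hpy : p y = true
      · simp [PySem.Set.discard, hyx, List.find?, hpy]
      · have hpy' : p y = false := by simpa using hpy
        have hkeep : (!(y == x)) = true := by simp [hyx]
        simp only [PySem.Set.discard, List.filter_cons, hkeep, if_pos] at *
        simp [List.find?, hpy', ih]

-- scanning the deduplicated (first-occurrence) list finds the same first hit
theorem find?_ofList (p : String → Bool) (ws : List String) :
    (PySem.Set.ofList ws).find? p = ws.find? p := by
  induction ws with
  | nil => rfl
  | cons x t ih =>
    rw [PySem.Set.ofList_cons]
    by_cases hpx : p x = true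
    · simp [List.find?, hpx]
    · have hpx' : p x = false := by simpa using hpx
      simp only [List.find?, hpx']
      rw [find?_discard p _ x hpx', ih]

-- ===== VERDICT (by name: the statement is the Claim_ definition above) =====
theorem find_duplicate_words_spec : Claim_equal_find_duplicate_words := by
  intro sentence _
  simp only [Spec_find_duplicate_words, find_duplicate_words, find_duplicate_words_alt]
  rw [fold_eq_counter, PySem.Dict.items_counter, List.find?_map]
  rw [Option.map_map]
  have hp : ((fun (p : String × Int) => p.2 == 2) ∘ fun k => (k, (List.count k (PySem.Str.split₀ sentence) : Int)))
      = fun w => (PySem.Str.split₀ sentence).count w == 2 := by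
    funext w
    simp [List.count]
    omega
  rw [hp, find?_ofList]
  cases List.find? (fun w => List.count w (PySem.Str.split₀ sentence) == 2) (PySem.Str.split₀ sentence) <;> rfl
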